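-- pv_equiv track=rewrite | github.com/KrzysztofSwedziol/Teoria-Wspolbieznosci-AGH | lab5 Dependencies, Independencies, normal Foatas form FNF of trace and Shorted Graph for given word/TW raport2 plik z kodem w pycharmie/zadanie.py | modify_word
-- ===== SOURCE A (Python) =====
-- def modify_word(word):
--     counter = {}
--     n = len(word)
--     for char in word:
--         counter[char] = 0
--
--     for char in word:
--         counter[char] = counter.get(char) + 1
--
--     new_word = []
--     for char in word:
--         new_word.append(char)
--
--     for i in range(n-1, -1, -1):
--         char = new_word[i]
--         if counter[char] > 0:
--             remembered_char = char
--             new_word[i] = char + str(counter[char])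
--             counter[remembered_char] -= 1
--
--     return new_word
-- ===== SOURCE B (Python) =====
-- def modify_word(word):
--     counter = {}
--     result = []
--     for char in word:
--         counter[char] = counter.get(char, 0) + 1
--         result.append(char + str(counter[char]))
--     return result
-- ===== Notes on version B (the rewrite author's own statement) =====
-- stated objective: simpler
-- what changed: B replaces A's four passes (zeroing a count table, counting, copying the word, then relabeling backwards while decrementing counts) by one forward pass that increments a running counter per character and appends the numbered character immediately.
import Mathlib
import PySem

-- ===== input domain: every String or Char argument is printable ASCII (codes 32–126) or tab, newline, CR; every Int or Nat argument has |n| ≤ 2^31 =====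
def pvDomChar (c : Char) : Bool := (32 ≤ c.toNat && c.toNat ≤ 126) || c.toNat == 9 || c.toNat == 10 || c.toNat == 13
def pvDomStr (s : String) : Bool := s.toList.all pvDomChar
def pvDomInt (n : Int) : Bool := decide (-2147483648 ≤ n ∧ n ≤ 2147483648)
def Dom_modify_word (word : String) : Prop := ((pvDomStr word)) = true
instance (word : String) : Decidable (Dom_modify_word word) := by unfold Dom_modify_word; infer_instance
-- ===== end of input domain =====

-- B numbers each character occurrence in one forward pass with a running counter,
-- instead of A's count-table + copy + backward relabeling passes; same return value (objective: simpler).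

-- ===== PORT A =====
-- Python chars are 1-char strings; the counter is keyed by them, so: Dict String Int, key c.toString.
-- The backward loop's index i is always in range and its keys always present, so the
-- pyGetD/getD defaults below are never the values Python would raise on.
def modify_word (word : String) : List String :=
  let counter : PySem.Dict String Int := PySem.Dict.empty
  let n : Int := PySem.Str.len word
  let counter := word.toList.foldl (fun d c => d.insert c.toString 0) counter
  let counter := word.toList.foldl (fun d c => d.insert c.toString ((d.get? c.toString).getD 0 + 1)) counter
  let new_word : List String := word.toList.foldl (fun l c => l ++ [c.toString]) []
  let st := (PySem.List.pyRange (n - 1) (-1) (-1)).foldl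
    (fun (st : List String × PySem.Dict String Int) i =>
      let nw := st.1
      let ctr := st.2
      let char := PySem.List.pyGetD nw i ""          -- new_word[i], i in range
      if ctr.getD char 0 > 0 then
        (PySem.List.pySetD nw i (char ++ PySem.Int.toStr (ctr.getD char 0)),
         ctr.insert char (ctr.getD char 0 - 1))
      else (nw, ctr))
    (new_word, counter)
  st.1

-- ===== PORT B =====
def modify_word_alt (word : String) : List String :=
  (word.toList.foldl
    (fun (st : PySem.Dict String Int × List String) c =>
      let k := st.1.getD c.toString 0 + 1
      (st.1.insert c.toString k, st.2 ++ [c.toString ++ PySem.Int.toStr k]))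
    (PySem.Dict.empty, [])).2

-- ===== PRECONDITION & SPEC =====
def Spec_modify_word (word : String) (out : List String) : Prop := out = modify_word_alt word
instance (word : String) (out : List String) : Decidable (Spec_modify_word word out) := by unfold Spec_modify_word; infer_instance

-- ===== CLAIM (what is proved, stated in full; the proofs are below) =====
def Claim_equal_modify_word : Prop := ∀ (word : String), Dom_modify_word word → Spec_modify_word word (modify_word word)



-- ===== LEMMAS AND PROOFS =====

-- canonical numbering: each char of l tagged with (count in seen-prefix + 1)
def pvNumb (seen : List Char) : List Char → List String
  | [] => []
  | c :: l => (c.toString ++ PySem.Int.toStr ((seen.count c : Int) + 1)) :: pvNumb (seen ++ [c]) l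

theorem pvInj {c d : Char} (h : c.toString = d.toString) : c = d := by
  have := congrArg String.toList h; simpa using this

theorem pvNumb_concat (l : List Char) (seen : List Char) (c : Char) :
    pvNumb seen (l ++ [c])
      = pvNumb seen l ++ [c.toString ++ PySem.Int.toStr (((seen ++ l).count c : Int) + 1)] := by
  induction l generalizing seen with
  | nil => simp [pvNumb]
  | cons x l ih =>
      simp only [List.cons_append, pvNumb, ih (seen ++ [x]), List.append_assoc]
      rfl

-- B's single pass computes pvNumb
theorem pvAltLoop (l : List Char) (d : PySem.Dict String Int) (acc : List String)
    (seen : List Char)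
    (hd : ∀ c : Char, d.getD c.toString 0 = (seen.count c : Int)) :
    (l.foldl
        (fun (st : PySem.Dict String Int × List String) c =>
          (st.1.insert c.toString (st.1.getD c.toString 0 + 1),
           st.2 ++ [c.toString ++ PySem.Int.toStr (st.1.getD c.toString 0 + 1)]))
        (d, acc)).2 = acc ++ pvNumb seen l := by
  induction l generalizing d acc seen with
  | nil => simp [pvNumb]
  | cons c l ih =>
      simp only [List.foldl_cons, pvNumb]
      rw [ih _ _ (seen ++ [c])]
      · rw [hd c]; simp
      · intro c'
        by_cases hcc : c' = c
        · subst hcc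
          rw [PySem.Dict.getD_insert_self, hd c']
          simp [List.count_append]
        · have hne : c'.toString ≠ c.toString := fun h => hcc (pvInj h)
          rw [PySem.Dict.getD_insert_of_ne _ _ _ hne, hd c']
          have h0 : List.count c' [c] = 0 := by rw [List.count_eq_zero]; simp [hcc]
          simp [List.count_append, h0]

-- A's second pass adds the multiplicities on top of any dict
theorem pvPass2 (l : List Char) (d : PySem.Dict String Int) (c : Char) :
    (l.foldl (fun d c => d.insert c.toString ((d.get? c.toString).getD 0 + 1)) d).getD
        c.toString 0 = d.getD c.toString 0 + l.count c := by
  induction l generalizing d with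
  | nil => simp
  | cons x l ih =>
      simp only [List.foldl_cons, ih]
      by_cases hcc : c = x
      · subst hcc
        rw [PySem.Dict.getD_insert_self]
        have h0 : ((d.get? c.toString).getD 0 : Int) = d.getD c.toString 0 := rfl
        rw [h0, List.count_cons_self]
        push_cast; ring
      · have hne : c.toString ≠ x.toString := fun h => hcc (pvInj h)
        rw [PySem.Dict.getD_insert_of_ne _ _ _ hne]
        have h0 : List.count c (x :: l) = List.count c l := by
          rw [List.count_cons]; simp [Ne.symm hcc]
        rw [h0]

-- A's first pass keeps every getD ... 0 at 0
theorem pvPass1 (l : List Char) (d : PySem.Dict String Int)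
    (hd : ∀ s : String, d.getD s 0 = 0) (s : String) :
    (l.foldl (fun d c => d.insert c.toString 0) d).getD s 0 = 0 := by
  induction l generalizing d with
  | nil => exact hd s
  | cons x l ih =>
      simp only [List.foldl_cons]
      refine ih _ (fun t => ?_)
      by_cases h : t = x.toString
      · subst h; rw [PySem.Dict.getD_insert_self]
      · rw [PySem.Dict.getD_insert_of_ne _ _ _ h, hd t]

-- A's backward relabeling loop, by reverse induction on the word
theorem pvBackLoop (l : List Char) (rest : List String) (d : PySem.Dict String Int)
    (hd : ∀ c : Char, d.getD c.toString 0 = (l.count c : Int)) :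
    ((PySem.List.pyRange ((l.length : Int) - 1) (-1) (-1)).foldl
        (fun (st : List String × PySem.Dict String Int) i =>
          if st.2.getD (PySem.List.pyGetD st.1 i "") 0 > 0 then
            (PySem.List.pySetD st.1 i
                (PySem.List.pyGetD st.1 i ""
                  ++ PySem.Int.toStr (st.2.getD (PySem.List.pyGetD st.1 i "") 0)),
             st.2.insert (PySem.List.pyGetD st.1 i "")
                (st.2.getD (PySem.List.pyGetD st.1 i "") 0 - 1))
          else (st.1, st.2))
        (l.map Char.toString ++ rest, d)).1 = pvNumb [] l ++ rest := by
  induction l using List.reverseRecOn generalizing rest d with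
  | nil =>
      rw [PySem.List.pyRange_neg_one_eq_nil (by norm_num)]
      simp [pvNumb]
  | append_singleton l c ih =>
      have hlen : ((l ++ [c]).length : Int) - 1 = (l.length : Int) := by simp
      rw [hlen, PySem.List.pyRange_neg_one_cons (by omega)]
      simp only [List.foldl_cons]
      have hget : PySem.List.pyGetD ((l ++ [c]).map Char.toString ++ rest) (l.length : Int) ""
          = c.toString := by
        have h1 : ((l ++ [c]).map Char.toString ++ rest)
            = l.map Char.toString ++ (c.toString :: rest) := by simp
        rw [h1, PySem.List.pyGetD_natCast]
        rw [List.getD_eq_getElem?_getD, List.getElem?_append_right (by simp)]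
        simp
      rw [hget]
      have hcnt' : d.getD c.toString 0 = (l.count c : Int) + 1 := by
        rw [hd c]; simp [List.count_append]
      have hpos : d.getD c.toString 0 > 0 := by rw [hcnt']; positivity
      rw [if_pos hpos]
      have hset : PySem.List.pySetD ((l ++ [c]).map Char.toString ++ rest) (l.length : Int)
            (c.toString ++ PySem.Int.toStr (d.getD c.toString 0))
          = l.map Char.toString
            ++ ((c.toString ++ PySem.Int.toStr (((l.count c : Int)) + 1)) :: rest) := by
        have h1 : ((l ++ [c]).map Char.toString ++ rest)
            = l.map Char.toString ++ (c.toString :: rest) := by simp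
        rw [h1, PySem.List.pySetD_natCast, hcnt']
        have hl : l.length = (l.map Char.toString).length := by simp
        rw [hl, List.set_append_right _ _ (le_refl _)]
        simp
      rw [hset, ih]
      · rw [pvNumb_concat]
        simp
      · intro c'
        by_cases hcc : c' = c
        · subst hcc
          rw [PySem.Dict.getD_insert_self, hcnt']
          simp
        · have hne : c'.toString ≠ c.toString := fun h => hcc (pvInj h)
          rw [PySem.Dict.getD_insert_of_ne _ _ _ hne, hd c']
          have h0 : List.count c' [c] = 0 := by rw [List.count_eq_zero]; simp [hcc]
          simp [List.count_append, h0]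

-- ===== VERDICT (by name: the statement is the Claim_ definition above) =====
theorem modify_word_spec : Claim_equal_modify_word := by
  intro word _
  unfold Spec_modify_word modify_word modify_word_alt
  simp only [PySem.Str.len_eq, PySem.List.foldl_append_singleton_eq_map, List.nil_append]
  have hctr : ∀ c : Char,
      (word.toList.foldl (fun d c => d.insert c.toString ((d.get? c.toString).getD 0 + 1))
        (word.toList.foldl (fun d c => d.insert c.toString 0) PySem.Dict.empty)).getD
          c.toString 0 = (word.toList.count c : Int) := by
    intro c
    rw [pvPass2, pvPass1 _ _ (fun s => by simp [pysem])]
    simp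
  have hA := pvBackLoop word.toList [] _ hctr
  simp only [List.append_nil] at hA
  rw [hA, pvAltLoop word.toList PySem.Dict.empty [] []
    (fun c => by simp [pysem])]
  simp
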